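-- pv_equiv track=rewrite | github.com/MrBrantCode/unitest_baseline | mut_generate/mist_train_cf/cf_86528/solution.py | sort_and_remove_duplicates
-- ===== SOURCE A (Python) =====
-- def sort_and_remove_duplicates(input_list):
--     """
--     Sorts a given list of integers in descending order using selection sort and removes any duplicate values.
--
--     Args:
--     input_list (list): A list of integers to be sorted and have duplicates removed.
--
--     Returns:
--     list: A sorted list of unique integers in descending order.
--     """
--
--     sorted_list = []
--     given_list = input_list.copy()  # Create a copy of the input list
--
--     while given_list:
--         maximum = max(given_list)
--         if maximum in sorted_list:
--             given_list.remove(maximum)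
--             continue
--
--         sorted_list.append(maximum)
--         given_list.remove(maximum)
--
--     return sorted_list
-- ===== SOURCE B (Python) =====
-- def sort_and_remove_duplicates(input_list):
--     result = []
--     for x in sorted(input_list, reverse=True):
--         if not result or result[-1] != x:
--             result.append(x)
--     return result
-- ===== Notes on version B (the rewrite author's own statement) =====
-- stated objective: faster
-- what changed: Replaced the repeated max-scan-and-remove selection loop with a single sort followed by one linear pass that skips adjacent duplicates.
import Mathlib
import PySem

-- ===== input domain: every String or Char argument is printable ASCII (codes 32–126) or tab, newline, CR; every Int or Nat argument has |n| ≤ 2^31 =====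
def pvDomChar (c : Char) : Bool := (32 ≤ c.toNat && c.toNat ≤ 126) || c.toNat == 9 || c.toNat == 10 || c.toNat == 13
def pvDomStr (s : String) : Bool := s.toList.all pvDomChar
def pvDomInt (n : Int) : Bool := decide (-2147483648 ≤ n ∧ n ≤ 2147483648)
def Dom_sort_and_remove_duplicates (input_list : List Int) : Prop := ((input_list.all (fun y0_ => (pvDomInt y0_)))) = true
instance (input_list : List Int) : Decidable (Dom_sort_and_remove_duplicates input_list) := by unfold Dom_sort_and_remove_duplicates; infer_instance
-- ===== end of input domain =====

-- B replaces A's repeated max-scan-and-remove selection loop with one sort plus a linear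
-- adjacent-duplicate-skipping pass (faster: O(n log n) vs O(n^2)). A does not mutate its input.

-- ===== PORT A =====
-- the while loop: state (sorted_list, given_list); each iteration takes max(given_list),
-- appends it to sorted_list unless already present, and removes one occurrence.
def pvLoopA (sorted_list given_list : List Int) : List Int :=
  match hmax : PySem.List.max? given_list (fun x => x) with
  | none => sorted_list        -- given_list is empty: while loop exits
  | some m =>
    -- given_list.remove(maximum): m ∈ given_list, so remove? is some
    let rest := (PySem.List.remove? given_list m).getD []
    if m ∈ sorted_list then
      pvLoopA sorted_list rest
    else
      pvLoopA (sorted_list ++ [m]) rest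
termination_by given_list.length
decreasing_by
  all_goals
    have hm := PySem.List.max?_mem hmax
    have h1 := List.length_erase_of_mem hm
    have h2 : 0 < given_list.length := List.length_pos_of_mem hm
    simp [PySem.List.remove?_eq_some_erase _ m hm]
    omega

def sort_and_remove_duplicates (input_list : List Int) : List Int :=
  pvLoopA [] input_list

-- ===== PORT B =====
-- result.append(x) is modelled as cons onto the reversed accumulator (result[-1] = head),
-- reversed once at the end.
def sort_and_remove_duplicates_alt (input_list : List Int) : List Int :=
  ((PySem.List.sorted input_list (fun x => x) true).foldl
    (fun result x => if result.head? ≠ some x then x :: result else result) []).reverse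

-- ===== PRECONDITION & SPEC =====
def Spec_sort_and_remove_duplicates (input_list : List Int) (out : List Int) : Prop := out = sort_and_remove_duplicates_alt input_list
instance (input_list : List Int) (out : List Int) : Decidable (Spec_sort_and_remove_duplicates input_list out) := by unfold Spec_sort_and_remove_duplicates; infer_instance

-- ===== CLAIM (what is proved, stated in full; the proofs are below) =====
def Claim_equal_sort_and_remove_duplicates : Prop := ∀ (input_list : List Int), Dom_sort_and_remove_duplicates input_list → Spec_sort_and_remove_duplicates input_list (sort_and_remove_duplicates input_list)

-- ===== LEMMAS AND PROOFS =====

-- Two strictly descending lists with the same members are equal.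
lemma pv_strictDesc_eq {l1 l2 : List Int} (h1 : l1.Pairwise (· > ·)) (h2 : l2.Pairwise (· > ·))
    (hm : ∀ x, x ∈ l1 ↔ x ∈ l2) : l1 = l2 := by
  have n1 : l1.Nodup := h1.imp (fun h => ne_of_gt h)
  have n2 : l2.Nodup := h2.imp (fun h => ne_of_gt h)
  exact List.Perm.eq_of_pairwise (fun a b _ _ ha hb => (lt_asymm ha hb).elim) h1 h2
    ((List.perm_ext_iff_of_nodup n1 n2).mpr hm)

-- Invariant for A's while loop.
lemma pvLoopA_spec : ∀ (n : Nat) (given acc : List Int), given.length ≤ n →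
    acc.Pairwise (· > ·) → (∀ a ∈ acc, ∀ g ∈ given, g ≤ a) →
    (pvLoopA acc given).Pairwise (· > ·) ∧ ∀ x, (x ∈ pvLoopA acc given ↔ x ∈ acc ∨ x ∈ given) := by
  intro n
  induction n with
  | zero =>
    intro given acc hlen hp _
    have : given = [] := List.eq_nil_of_length_eq_zero (Nat.le_zero.mp hlen)
    subst this
    rw [pvLoopA]
    simp [PySem.List.max?, hp]
  | succ n ih =>
    intro given acc hlen hp hord
    rw [pvLoopA]
    cases hmax : PySem.List.max? given (fun x => x) with
    | none =>
      have : given = [] := (PySem.List.max?_eq_none_iff _ _).mp hmax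
      subst this; simp [hp]
    | some m =>
      have hm : m ∈ given := PySem.List.max?_mem hmax
      have hmx : ∀ y ∈ given, y ≤ m := by
        intro y hy; exact PySem.List.max?_isMax hmax y hy
      have hrest : (PySem.List.remove? given m).getD [] = given.erase m := by
        simp [PySem.List.remove?_eq_some_erase _ m hm]
      have hlen' : (given.erase m).length ≤ n := by
        have h1 := List.length_erase_of_mem hm
        have h2 : 0 < given.length := List.length_pos_of_mem hm
        omega
      have hmemsplit : ∀ x, x ∈ given ↔ x = m ∨ x ∈ given.erase m := by
        intro x
        constructor
        · intro hx
          by_cases hxm : x = m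
          · exact Or.inl hxm
          · exact Or.inr ((List.mem_erase_of_ne hxm).mpr hx)
        · rintro (rfl | hx)
          · exact hm
          · exact List.mem_of_mem_erase hx
      simp only [hrest]
      by_cases hin : m ∈ acc
      · simp only [hin, if_true]
        have hord' : ∀ a ∈ acc, ∀ g ∈ given.erase m, g ≤ a := by
          intro a ha g hg; exact hord a ha g (List.mem_of_mem_erase hg)
        obtain ⟨hpr, hmem⟩ := ih (given.erase m) acc hlen' hp hord'
        refine ⟨hpr, fun x => ?_⟩
        rw [hmem x]
        constructor
        · rintro (hx | hx)
          · exact Or.inl hx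
          · exact Or.inr (List.mem_of_mem_erase hx)
        · rintro (hx | hx)
          · exact Or.inl hx
          · rcases (hmemsplit x).mp hx with rfl | hx'
            · exact Or.inl hin
            · exact Or.inr hx'
      · simp only [hin, if_false]
        have hp' : (acc ++ [m]).Pairwise (· > ·) := by
          rw [List.pairwise_append]
          refine ⟨hp, List.pairwise_singleton _ _, ?_⟩
          intro a ha b hb
          simp only [List.mem_singleton] at hb
          rw [hb]
          have hle : m ≤ a := hord a ha m hm
          exact lt_of_le_of_ne hle (fun h => hin (h ▸ ha))
        have hord' : ∀ a ∈ acc ++ [m], ∀ g ∈ given.erase m, g ≤ a := by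
          intro a ha g hg
          have hg' : g ∈ given := List.mem_of_mem_erase hg
          rcases List.mem_append.mp ha with ha | ha
          · exact hord a ha g hg'
          · simp only [List.mem_singleton] at ha; subst ha
            exact hmx g hg'
        obtain ⟨hpr, hmem⟩ := ih (given.erase m) (acc ++ [m]) hlen' hp' hord'
        refine ⟨hpr, fun x => ?_⟩
        rw [hmem x]
        simp only [List.mem_append, List.mem_singleton]
        constructor
        · rintro ((hx | rfl) | hx)
          · exact Or.inl hx
          · exact Or.inr hm
          · exact Or.inr (List.mem_of_mem_erase hx)
        · rintro (hx | hx)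
          · exact Or.inl (Or.inl hx)
          · rcases (hmemsplit x).mp hx with rfl | hx'
            · exact Or.inl (Or.inr rfl)
            · exact Or.inr hx'

-- Invariant for B's dedup fold (accumulator holds the output reversed: strictly ascending).
lemma pvLoopB_spec : ∀ (s acc : List Int), s.Pairwise (fun a b => b ≤ a) →
    acc.Pairwise (· < ·) → (∀ x ∈ s, ∀ a, acc.head? = some a → x ≤ a) →
    (s.foldl (fun result x => if result.head? ≠ some x then x :: result else result) acc).Pairwise (· < ·) ∧
    ∀ y, (y ∈ s.foldl (fun result x => if result.head? ≠ some x then x :: result else result) acc ↔ y ∈ acc ∨ y ∈ s) := by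
  intro s
  induction s with
  | nil => intro acc _ hp _; simpa using hp
  | cons x s' ih =>
    intro acc hs hp hhd
    have hs' : s'.Pairwise (fun a b => b ≤ a) := (List.pairwise_cons.mp hs).2
    have hxmax : ∀ y ∈ s', y ≤ x := (List.pairwise_cons.mp hs).1
    simp only [List.foldl_cons]
    by_cases hcond : acc.head? = some x
    · have step : (if acc.head? ≠ some x then x :: acc else acc) = acc := by simp [hcond]
      rw [step]
      have hhd' : ∀ z ∈ s', ∀ a, acc.head? = some a → z ≤ a := by
        intro z hz a ha
        rw [hcond] at ha
        injection ha with ha; subst ha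
        exact hxmax z hz
      obtain ⟨hpr, hmem⟩ := ih acc hs' hp hhd'
      refine ⟨hpr, fun y => ?_⟩
      rw [hmem y]
      have hxacc : x ∈ acc := by
        cases acc with
        | nil => simp at hcond
        | cons h t => simp at hcond; subst hcond; exact List.mem_cons_self
      constructor
      · rintro (hy | hy)
        · exact Or.inl hy
        · exact Or.inr (List.mem_cons_of_mem _ hy)
      · rintro (hy | hy)
        · exact Or.inl hy
        · rcases List.mem_cons.mp hy with rfl | hy'
          · exact Or.inl hxacc
          · exact Or.inr hy'
    · have step : (if acc.head? ≠ some x then x :: acc else acc) = x :: acc := by simp [hcond]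
      rw [step]
      have hp' : (x :: acc).Pairwise (· < ·) := by
        rw [List.pairwise_cons]
        refine ⟨?_, hp⟩
        intro a ha
        cases acc with
        | nil => simp at ha
        | cons h t =>
          have hxh : x ≤ h := hhd x (List.mem_cons_self) h rfl
          have hxh' : x < h := lt_of_le_of_ne hxh (by intro h'; exact hcond (by simp [h']))
          rcases List.mem_cons.mp ha with rfl | ha'
          · exact hxh'
          · exact lt_trans hxh' ((List.pairwise_cons.mp hp).1 a ha')
      have hhd' : ∀ z ∈ s', ∀ a, (x :: acc).head? = some a → z ≤ a := by
        intro z hz a ha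
        simp only [List.head?_cons] at ha
        injection ha with ha; subst ha
        exact hxmax z hz
      obtain ⟨hpr, hmem⟩ := ih (x :: acc) hs' hp' hhd'
      refine ⟨hpr, fun y => ?_⟩
      rw [hmem y]
      simp only [List.mem_cons]
      tauto

-- ===== VERDICT (by name: the statement is the Claim_ definition above) =====
theorem sort_and_remove_duplicates_spec : Claim_equal_sort_and_remove_duplicates := by
  intro input_list _
  unfold Spec_sort_and_remove_duplicates sort_and_remove_duplicates sort_and_remove_duplicates_alt
  set s := PySem.List.sorted input_list (fun x => x) true with hsdef
  have hssort : s.Pairwise (fun a b => b ≤ a) := PySem.List.sorted_pairwise_rev input_list (fun x => x)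
  have hsmem : ∀ x, x ∈ s ↔ x ∈ input_list := fun x => PySem.List.mem_sorted input_list (fun x => x) true x
  obtain ⟨hApr, hAmem⟩ := pvLoopA_spec input_list.length input_list [] le_rfl (List.Pairwise.nil) (by simp)
  obtain ⟨hBpr, hBmem⟩ := pvLoopB_spec s [] hssort List.Pairwise.nil (by simp)
  apply pv_strictDesc_eq hApr
  · rw [List.pairwise_reverse]
    exact hBpr
  · intro x
    rw [List.mem_reverse, hBmem x, hAmem x, hsmem x]
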